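-- pv_equiv track=rewrite | github.com/Pavan5339/machine-learning-app | backend/app.py | parse_documents_from_text
-- ===== SOURCE A (Python) =====
-- def parse_documents_from_text(text):
--     documents = []
--     current_title = None
--     current_description = ""
--     full_text_list = []
--
--     for line in text.split('\n'):
--         # Clean up lines
--         line = line.strip()
--
--         # Check for title
--         if line.lower().startswith('title:'):
--             # If we have a previous description, save it
--             if current_title and current_description:
--                 documents.append({"title": current_title, "description": current_description.strip()})
--                 full_text_list.append(f"{current_title} {current_description.strip()}")
--
--             # Start a new document
--             current_title = line[6:].strip().replace('"', '')
--             current_description = ""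
--         elif line.lower().startswith('description:'):
--             current_description = line[12:].strip().replace('"', '')
--         elif current_title and line: # Continue appending to the current description
--             current_description += " " + line
--
--     # Add the last document
--     if current_title and current_description:
--         documents.append({"title": current_title, "description": current_description.strip()})
--         full_text_list.append(f"{current_title} {current_description.strip()}")
--
--     return documents, full_text_list
-- ===== SOURCE B (Python) =====
-- def parse_documents_from_text(text):
--     # two-phase: partition stripped lines into title-led groups, then render each group
--     lines = [ln.strip() for ln in text.split('\n')]
--     groups = []
--     cur = None
--     for ln in lines:
--         if ln.lower().startswith('title:'):
--             if cur is not None: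
--                 groups.append(cur)
--             cur = [ln]
--         elif cur is not None:
--             cur.append(ln)
--     if cur is not None:
--         groups.append(cur)
--     documents = []
--     full_text_list = []
--     for g in groups:
--         title = g[0][6:].strip().replace('"', '')
--         desc = ""
--         for ln in g[1:]:
--             if ln.lower().startswith('description:'):
--                 desc = ln[12:].strip().replace('"', '')
--             elif title and ln:
--                 desc += " " + ln
--         if title and desc:
--             d = desc.strip()
--             documents.append({"title": title, "description": d})
--             full_text_list.append(f"{title} {d}")
--     return documents, full_text_list
-- ===== Notes on version B (the rewrite author's own statement) =====
-- stated objective: alternative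
-- what changed: A's single stateful scan (current_title/current_description threaded through one loop with a trailing flush) is replaced by a two-phase pipeline: partition the stripped lines into title-led groups, then render each group's title and description independently.
import Mathlib
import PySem

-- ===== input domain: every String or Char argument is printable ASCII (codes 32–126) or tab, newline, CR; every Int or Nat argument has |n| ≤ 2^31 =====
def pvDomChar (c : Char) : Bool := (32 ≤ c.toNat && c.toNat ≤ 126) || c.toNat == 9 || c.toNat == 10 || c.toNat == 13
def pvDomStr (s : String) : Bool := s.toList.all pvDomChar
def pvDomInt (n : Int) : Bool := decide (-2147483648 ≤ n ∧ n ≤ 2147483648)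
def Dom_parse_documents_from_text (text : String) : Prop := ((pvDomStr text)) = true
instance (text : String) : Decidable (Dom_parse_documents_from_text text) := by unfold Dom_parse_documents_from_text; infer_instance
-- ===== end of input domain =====

-- B re-organises A's single stateful scan into a two-phase pipeline (partition the stripped
-- lines into title-led groups, then render each group); same return value, objective: alternative.

-- ===== PORT A =====
-- one iteration of A's for-loop; state = (documents, current_title, current_description, full_text_list)
def pdftA_step (st : List (List (String × String)) × Option String × String × List String)
    (raw : String) : List (List (String × String)) × Option String × String × List String :=
  match st with
  | (docs, ot, d, fulls) =>
    let line := PySem.Str.strip raw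
    if PySem.Str.startswith (PySem.Str.lower line) "title:" then
      let flushed :=
        match ot with
        | some t =>
          if t ≠ "" ∧ d ≠ "" then
            (docs ++ [[("title", t), ("description", PySem.Str.strip d)]],
             fulls ++ [t ++ " " ++ PySem.Str.strip d])
          else (docs, fulls)
        | none => (docs, fulls)
      (flushed.1,
       some (PySem.Str.replace (PySem.Str.strip (PySem.Str.slice line (some 6) none)) "\"" ""),
       "", flushed.2)
    else if PySem.Str.startswith (PySem.Str.lower line) "description:" then
      (docs, ot, PySem.Str.replace (PySem.Str.strip (PySem.Str.slice line (some 12) none)) "\"" "", fulls)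
    else
      match ot with
      | some t => if t ≠ "" ∧ line ≠ "" then (docs, some t, d ++ " " ++ line, fulls) else (docs, some t, d, fulls)
      | none => (docs, none, d, fulls)

-- the trailing "add the last document" block of A
def pdftA_finish (st : List (List (String × String)) × Option String × String × List String) :
    List (List (String × String)) × List String :=
  match st with
  | (docs, ot, d, fulls) =>
    match ot with
    | some t =>
      if t ≠ "" ∧ d ≠ "" then
        (docs ++ [[("title", t), ("description", PySem.Str.strip d)]],
         fulls ++ [t ++ " " ++ PySem.Str.strip d])
      else (docs, fulls)
    | none => (docs, fulls)

-- text.split('\n') with the non-empty separator "\n": split? is some here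
def parse_documents_from_text (text : String) : (List (List (String × String))) × List String :=
  pdftA_finish (((PySem.Str.split? text "\n").getD []).foldl pdftA_step ([], none, "", []))

-- ===== PORT B =====
-- title computed from a group's header line: g[0][6:].strip().replace('"','')
def pdftB_title (h : String) : String :=
  PySem.Str.replace (PySem.Str.strip (PySem.Str.slice h (some 6) none)) "\"" ""

-- phase 1 loop body: partition the stripped lines into title-led groups (cur = open group)
def pdftB_gstep (st : List (List String) × Option (List String)) (ln : String) :
    List (List String) × Option (List String) :=
  match st with
  | (groups, cur) =>
    if PySem.Str.startswith (PySem.Str.lower ln) "title:" then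
      ((match cur with | some g => groups ++ [g] | none => groups), some [ln])
    else
      match cur with
      | some g => (groups, some (g ++ [ln]))
      | none => (groups, none)

-- phase 2 inner loop body: fold a group's tail line into the description
def pdftB_dstep (title : String) (desc : String) (ln : String) : String :=
  if PySem.Str.startswith (PySem.Str.lower ln) "description:" then
    PySem.Str.replace (PySem.Str.strip (PySem.Str.slice ln (some 12) none)) "\"" ""
  else if title ≠ "" ∧ ln ≠ "" then desc ++ " " ++ ln
  else desc

-- render one group; groups are non-empty by construction (the [] case is unreachable)
def pdftB_render (g : List String) : List (List (String × String)) × List String :=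
  match g with
  | [] => ([], [])
  | h :: rest =>
    let title := pdftB_title h
    let desc := rest.foldl (pdftB_dstep title) ""
    if title ≠ "" ∧ desc ≠ "" then
      ([[("title", title), ("description", PySem.Str.strip desc)]],
       [title ++ " " ++ PySem.Str.strip desc])
    else ([], [])

def parse_documents_from_text_alt (text : String) : (List (List (String × String))) × List String :=
  let lines := ((PySem.Str.split? text "\n").getD []).map PySem.Str.strip
  let gst := lines.foldl pdftB_gstep ([], none)
  let groups := match gst.2 with | some g => gst.1 ++ [g] | none => gst.1
  groups.foldl (fun acc g =>
    let r := pdftB_render g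
    (acc.1 ++ r.1, acc.2 ++ r.2)) ([], [])

-- ===== PRECONDITION & SPEC =====
def Spec_parse_documents_from_text (text : String) (out : (List (List (String × String))) × List String) : Prop := out = parse_documents_from_text_alt text
instance (text : String) (out : (List (List (String × String))) × List String) : Decidable (Spec_parse_documents_from_text text out) := by unfold Spec_parse_documents_from_text; infer_instance

-- ===== CLAIM (what is proved, stated in full; the proofs are below) =====
def Claim_equal_parse_documents_from_text : Prop := ∀ (text : String), Dom_parse_documents_from_text text → Spec_parse_documents_from_text text (parse_documents_from_text text)

-- ===== LEMMAS AND PROOFS =====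

-- the pair emitted for a finished logical document (title t, raw description d)
def pvEmit (t d : String) : List (List (String × String)) × List String :=
  if t ≠ "" ∧ d ≠ "" then
    ([[("title", t), ("description", PySem.Str.strip d)]], [t ++ " " ++ PySem.Str.strip d])
  else ([], [])

-- reference recursion on STRIPPED lines, current document open with title t and raw description d
def procOpen (t d : String) : List String → List (List (String × String)) × List String
  | [] => pvEmit t d
  | ln :: rest =>
    if PySem.Str.startswith (PySem.Str.lower ln) "title:" then
      ((pvEmit t d).1 ++ (procOpen (pdftB_title ln) "" rest).1,
       (pvEmit t d).2 ++ (procOpen (pdftB_title ln) "" rest).2)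
    else procOpen t (pdftB_dstep t d ln) rest

-- reference recursion before the first title line
def procClosed : List String → List (List (String × String)) × List String
  | [] => ([], [])
  | ln :: rest =>
    if PySem.Str.startswith (PySem.Str.lower ln) "title:" then procOpen (pdftB_title ln) "" rest
    else procClosed rest

theorem pvFinish_some (docs : List (List (String × String))) (t d : String) (fulls : List String) :
    pdftA_finish (docs, some t, d, fulls) = (docs ++ (pvEmit t d).1, fulls ++ (pvEmit t d).2) := by
  simp only [pdftA_finish, pvEmit]
  split_ifs <;> simp

theorem pvStepA_title (docs : List (List (String × String))) (t d : String) (fulls : List String)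
    (raw : String) (h : PySem.Str.startswith (PySem.Str.lower (PySem.Str.strip raw)) "title:" = true) :
    pdftA_step (docs, some t, d, fulls) raw
      = (docs ++ (pvEmit t d).1, some (pdftB_title (PySem.Str.strip raw)), "", fulls ++ (pvEmit t d).2) := by
  simp only [pdftA_step, pdftB_title, pvEmit, h, if_true]
  split_ifs <;> simp

theorem pvStepA_title_none (docs : List (List (String × String))) (d : String) (fulls : List String)
    (raw : String) (h : PySem.Str.startswith (PySem.Str.lower (PySem.Str.strip raw)) "title:" = true) :
    pdftA_step (docs, none, d, fulls) raw
      = (docs, some (pdftB_title (PySem.Str.strip raw)), "", fulls) := by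
  simp at h
  simp [pdftA_step, pdftB_title, h]

theorem pvStepA_other (docs : List (List (String × String))) (t d : String) (fulls : List String)
    (raw : String) (h : PySem.Str.startswith (PySem.Str.lower (PySem.Str.strip raw)) "title:" = false) :
    pdftA_step (docs, some t, d, fulls) raw
      = (docs, some t, pdftB_dstep t d (PySem.Str.strip raw), fulls) := by
  simp only [pdftA_step, pdftB_dstep, h]
  split_ifs <;> simp_all

theorem pvStepA_other_none (docs : List (List (String × String))) (d : String) (fulls : List String)
    (raw : String) (h : PySem.Str.startswith (PySem.Str.lower (PySem.Str.strip raw)) "title:" = false) :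
    pdftA_step (docs, none, d, fulls) raw
      = (docs, none,
         if PySem.Str.startswith (PySem.Str.lower (PySem.Str.strip raw)) "description:"
         then PySem.Str.replace (PySem.Str.strip (PySem.Str.slice (PySem.Str.strip raw) (some 12) none)) "\"" ""
         else d, fulls) := by
  simp only [pdftA_step, h]
  split_ifs <;> simp_all

theorem pvProcOpen_title (t d ln : String) (rest : List String)
    (h : PySem.Str.startswith (PySem.Str.lower ln) "title:" = true) :
    procOpen t d (ln :: rest)
      = ((pvEmit t d).1 ++ (procOpen (pdftB_title ln) "" rest).1,
         (pvEmit t d).2 ++ (procOpen (pdftB_title ln) "" rest).2) := by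
  simp at h
  simp [procOpen, h]

theorem pvProcOpen_other (t d ln : String) (rest : List String)
    (h : PySem.Str.startswith (PySem.Str.lower ln) "title:" = false) :
    procOpen t d (ln :: rest) = procOpen t (pdftB_dstep t d ln) rest := by
  simp at h
  simp [procOpen, h]

theorem pvProcClosed_title (ln : String) (rest : List String)
    (h : PySem.Str.startswith (PySem.Str.lower ln) "title:" = true) :
    procClosed (ln :: rest) = procOpen (pdftB_title ln) "" rest := by
  simp at h
  simp [procClosed, h]

theorem pvProcClosed_other (ln : String) (rest : List String)
    (h : PySem.Str.startswith (PySem.Str.lower ln) "title:" = false) :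
    procClosed (ln :: rest) = procClosed rest := by
  simp at h
  simp [procClosed, h]

theorem pdftA_open (ls : List String) : ∀ (docs : List (List (String × String)))
    (t d : String) (fulls : List String),
    pdftA_finish (ls.foldl pdftA_step (docs, some t, d, fulls))
      = (docs ++ (procOpen t d (ls.map PySem.Str.strip)).1,
         fulls ++ (procOpen t d (ls.map PySem.Str.strip)).2) := by
  induction ls with
  | nil =>
    intro docs t d fulls
    simp only [List.foldl_nil, List.map_nil, procOpen, pvFinish_some]
  | cons raw ls ih =>
    intro docs t d fulls
    simp only [List.foldl_cons, List.map_cons]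
    cases h1 : PySem.Str.startswith (PySem.Str.lower (PySem.Str.strip raw)) "title:" with
    | true =>
      rw [pvStepA_title docs t d fulls raw h1, ih, pvProcOpen_title t d _ _ h1]
      simp [List.append_assoc]
    | false =>
      rw [pvStepA_other docs t d fulls raw h1, ih, pvProcOpen_other t d _ _ h1]

theorem pdftA_closed (ls : List String) : ∀ (docs : List (List (String × String)))
    (d : String) (fulls : List String),
    pdftA_finish (ls.foldl pdftA_step (docs, none, d, fulls))
      = (docs ++ (procClosed (ls.map PySem.Str.strip)).1,
         fulls ++ (procClosed (ls.map PySem.Str.strip)).2) := by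
  induction ls with
  | nil => intro docs d fulls; simp [pdftA_finish, procClosed]
  | cons raw ls ih =>
    intro docs d fulls
    simp only [List.foldl_cons, List.map_cons]
    cases h1 : PySem.Str.startswith (PySem.Str.lower (PySem.Str.strip raw)) "title:" with
    | true =>
      rw [pvStepA_title_none docs d fulls raw h1, pdftA_open, pvProcClosed_title _ _ h1]
    | false =>
      rw [pvStepA_other_none docs d fulls raw h1, ih, pvProcClosed_other _ _ h1]

-- phase-2 fold of B, as a function of the group list
def pvRenderAll (gs : List (List String)) : List (List (String × String)) × List String :=
  (gs.flatMap (fun g => (pdftB_render g).1), gs.flatMap (fun g => (pdftB_render g).2))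

theorem pdftB_renderFold (gs : List (List String)) :
    ∀ (a : List (List (String × String))) (b : List String),
    gs.foldl (fun acc g => let r := pdftB_render g; (acc.1 ++ r.1, acc.2 ++ r.2)) (a, b)
      = (a ++ (pvRenderAll gs).1, b ++ (pvRenderAll gs).2) := by
  induction gs with
  | nil => intro a b; simp [pvRenderAll]
  | cons g gs ih =>
    intro a b
    rw [List.foldl_cons]
    refine Eq.trans (ih (a ++ (pdftB_render g).1) (b ++ (pdftB_render g).2)) ?_
    simp [pvRenderAll]

theorem pvRender_cons (h : String) (rest : List String) :
    pdftB_render (h :: rest) = pvEmit (pdftB_title h) (rest.foldl (pdftB_dstep (pdftB_title h)) "") := rfl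

theorem pvGstep_title_some (groups : List (List String)) (g : List String) (ln : String)
    (h : PySem.Str.startswith (PySem.Str.lower ln) "title:" = true) :
    pdftB_gstep (groups, some g) ln = (groups ++ [g], some [ln]) := by
  simp at h
  simp [pdftB_gstep, h]

theorem pvGstep_title_none (groups : List (List String)) (ln : String)
    (h : PySem.Str.startswith (PySem.Str.lower ln) "title:" = true) :
    pdftB_gstep (groups, none) ln = (groups, some [ln]) := by
  simp at h
  simp [pdftB_gstep, h]

theorem pvGstep_other_some (groups : List (List String)) (g : List String) (ln : String)
    (h : PySem.Str.startswith (PySem.Str.lower ln) "title:" = false) :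
    pdftB_gstep (groups, some g) ln = (groups, some (g ++ [ln])) := by
  simp at h
  simp [pdftB_gstep, h]

theorem pvGstep_other_none (groups : List (List String)) (ln : String)
    (h : PySem.Str.startswith (PySem.Str.lower ln) "title:" = false) :
    pdftB_gstep (groups, none) ln = (groups, none) := by
  simp at h
  simp [pdftB_gstep, h]

theorem pdftB_open (ls : List String) : ∀ (groups : List (List String)) (h : String)
    (acc : List String),
    pvRenderAll ((match (ls.foldl pdftB_gstep (groups, some (h :: acc))).2 with
        | some g => (ls.foldl pdftB_gstep (groups, some (h :: acc))).1 ++ [g]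
        | none => (ls.foldl pdftB_gstep (groups, some (h :: acc))).1))
      = ((pvRenderAll groups).1 ++ (procOpen (pdftB_title h) (acc.foldl (pdftB_dstep (pdftB_title h)) "") ls).1,
         (pvRenderAll groups).2 ++ (procOpen (pdftB_title h) (acc.foldl (pdftB_dstep (pdftB_title h)) "") ls).2) := by
  induction ls with
  | nil =>
    intro groups h acc
    simp only [List.foldl_nil]
    show pvRenderAll (groups ++ [h :: acc]) = _
    simp [pvRenderAll, procOpen, pvRender_cons]
  | cons ln ls ih =>
    intro groups h acc
    simp only [List.foldl_cons]
    cases h1 : PySem.Str.startswith (PySem.Str.lower ln) "title:" with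
    | true =>
      rw [pvGstep_title_some groups (h :: acc) ln h1, ih (groups ++ [h :: acc]) ln [],
          pvProcOpen_title _ _ _ _ h1]
      simp [pvRenderAll, pvRender_cons, List.append_assoc]
    | false =>
      rw [pvGstep_other_some groups (h :: acc) ln h1,
          show (h :: acc) ++ [ln] = h :: (acc ++ [ln]) from rfl,
          ih groups h (acc ++ [ln]), pvProcOpen_other _ _ _ _ h1]
      simp [List.foldl_append]

theorem pdftB_closed (ls : List String) : ∀ (groups : List (List String)),
    pvRenderAll ((match (ls.foldl pdftB_gstep (groups, none)).2 with
        | some g => (ls.foldl pdftB_gstep (groups, none)).1 ++ [g]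
        | none => (ls.foldl pdftB_gstep (groups, none)).1))
      = ((pvRenderAll groups).1 ++ (procClosed ls).1,
         (pvRenderAll groups).2 ++ (procClosed ls).2) := by
  induction ls with
  | nil => intro groups; simp [procClosed, pvRenderAll]
  | cons ln ls ih =>
    intro groups
    simp only [List.foldl_cons]
    cases h1 : PySem.Str.startswith (PySem.Str.lower ln) "title:" with
    | true =>
      rw [pvGstep_title_none groups ln h1, pdftB_open ls groups ln [],
          pvProcClosed_title _ _ h1]
      simp
    | false =>
      rw [pvGstep_other_none groups ln h1, ih, pvProcClosed_other _ _ h1]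

-- ===== VERDICT (by name: the statement is the Claim_ definition above) =====
theorem parse_documents_from_text_spec : Claim_equal_parse_documents_from_text := by
  intro text _
  unfold Spec_parse_documents_from_text parse_documents_from_text parse_documents_from_text_alt
  rw [pdftA_closed, pdftB_renderFold, pdftB_closed]
  simp [pvRenderAll]
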